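-- pv_equiv track=rewrite | github.com/jpascher/T0-Time-Mass-Duality | convert_tex_umlauts.py | convert_tex_umlauts
-- ===== SOURCE A (Python) =====
-- def convert_tex_umlauts(content):
--     """Convert TeX umlauts to UTF-8"""
--
--     # Define replacements (order matters!)
--     # Format: (find_string, replace_string)
--     replacements = [
--         ('{\\"a}', 'ä'),
--         ('{\\"o}', 'ö'),
--         ('{\\"u}', 'ü'),
--         ('{\\"A}', 'Ä'),
--         ('{\\"O}', 'Ö'),
--         ('{\\"U}', 'Ü'),
--         ('\\"a', 'ä'),
--         ('\\"o', 'ö'),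
--         ('\\"u', 'ü'),
--         ('\\"A', 'Ä'),
--         ('\\"O', 'Ö'),
--         ('\\"U', 'Ü'),
--         ('{\\"a}', 'ä'),
--         ('{\\ss}', 'ß'),
--         ('\\ss', 'ß'),
--         ('f\\"u', 'für'),
--         ('f\\"a', 'fär'),  # falls es vorkommt
--         ('f\\"o', 'för'),  # falls es vorkommt
--     ]
--
--     modified = False
--     for find_str, replace_str in replacements:
--         if find_str in content:
--             content = content.replace(find_str, replace_str)
--             modified = True
--
--     return content, modified
-- ===== SOURCE B (Python) =====
-- # Single left-to-right scan: at each position try the live patterns (longest first)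
-- # and emit the replacement, instead of A's 18 sequential full-string replace passes.
-- # The f\"u / f\"a / f\"o entries of A are dead (the \"x pass always runs first), so
-- # they are not in the table. modified is recovered as result != content.
--
-- _PATTERNS = [
--     ('{\\"a}', 'ä'), ('{\\"o}', 'ö'), ('{\\"u}', 'ü'),
--     ('{\\"A}', 'Ä'), ('{\\"O}', 'Ö'), ('{\\"U}', 'Ü'),
--     ('{\\ss}', 'ß'),
--     ('\\"a', 'ä'), ('\\"o', 'ö'), ('\\"u', 'ü'),
--     ('\\"A', 'Ä'), ('\\"O', 'Ö'), ('\\"U', 'Ü'),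
--     ('\\ss', 'ß'),
-- ]
--
--
-- def convert_tex_umlauts(content):
--     """Convert TeX umlauts to UTF-8"""
--     out = []
--     i = 0
--     n = len(content)
--     while i < n:
--         for find_str, replace_str in _PATTERNS:
--             if content.startswith(find_str, i):
--                 out.append(replace_str)
--                 i += len(find_str)
--                 break
--         else:
--             out.append(content[i])
--             i += 1
--     result = ''.join(out)
--     return result, result != content
-- ===== Notes on version B (the rewrite author's own statement) =====
-- stated objective: alternative
-- what changed: A runs 18 sequential full-string str.replace passes (with three dead f\"x entries) and tracks a fired-flag; B makes one left-to-right scan emitting the replacement of the first live pattern matching at each position (longest patterns first) and recovers modified as result != content.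
import Mathlib
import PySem

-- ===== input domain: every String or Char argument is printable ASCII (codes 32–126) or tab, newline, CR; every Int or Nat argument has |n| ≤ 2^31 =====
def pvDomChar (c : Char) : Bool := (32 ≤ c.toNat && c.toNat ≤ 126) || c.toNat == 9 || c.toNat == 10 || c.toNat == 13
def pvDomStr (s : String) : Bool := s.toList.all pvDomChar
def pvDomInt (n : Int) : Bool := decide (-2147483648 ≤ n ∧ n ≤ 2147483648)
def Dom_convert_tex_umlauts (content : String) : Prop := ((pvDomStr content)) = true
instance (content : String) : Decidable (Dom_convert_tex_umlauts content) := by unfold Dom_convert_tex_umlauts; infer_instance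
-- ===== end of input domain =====

-- B replaces A's 18 sequential full-string replace passes by one left-to-right scan
-- over the 14 live patterns (alternative decomposition; same exact result and flag).

-- ===== PORT A =====
def pvReplacements : List (String × String) :=
  [ ("{\\\"a}", "ä"), ("{\\\"o}", "ö"), ("{\\\"u}", "ü"),
    ("{\\\"A}", "Ä"), ("{\\\"O}", "Ö"), ("{\\\"U}", "Ü"),
    ("\\\"a", "ä"), ("\\\"o", "ö"), ("\\\"u", "ü"),
    ("\\\"A", "Ä"), ("\\\"O", "Ö"), ("\\\"U", "Ü"),
    ("{\\\"a}", "ä"), ("{\\ss}", "ß"), ("\\ss", "ß"),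
    ("f\\\"u", "für"), ("f\\\"a", "fär"), ("f\\\"o", "för") ]

def convert_tex_umlauts (content : String) : String × Bool :=
  pvReplacements.foldl
    (fun st pr =>
      if PySem.Str.isIn pr.1 st.1 then (PySem.Str.replace st.1 pr.1 pr.2, true) else st)
    (content, false)

-- ===== PORT B =====
-- the live patterns, longest first (= _PATTERNS in Source B)
def pvTable : List (List Char × List Char) :=
  [ (['{','\\','"','a','}'], ['ä']), (['{','\\','"','o','}'], ['ö']), (['{','\\','"','u','}'], ['ü']),
    (['{','\\','"','A','}'], ['Ä']), (['{','\\','"','O','}'], ['Ö']), (['{','\\','"','U','}'], ['Ü']),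
    (['{','\\','s','s','}'], ['ß']),
    (['\\','"','a'], ['ä']), (['\\','"','o'], ['ö']), (['\\','"','u'], ['ü']),
    (['\\','"','A'], ['Ä']), (['\\','"','O'], ['Ö']), (['\\','"','U'], ['Ü']),
    (['\\','s','s'], ['ß']) ]

-- the while-loop of Source B: at each position, first matching pattern fires, else copy the char
def pvScan : List Char → List Char
  | [] => []
  | c :: t =>
    match pvTable.find? (fun pr => pr.1.isPrefixOf (c :: t)) with
    | some pr => pr.2 ++ pvScan (t.drop (pr.1.length - 1))
    | none => c :: pvScan t
termination_by l => l.length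
decreasing_by all_goals (simp; try omega)

def convert_tex_umlauts_alt (content : String) : String × Bool :=
  let res := String.ofList (pvScan content.toList)
  (res, res != content)

-- ===== PRECONDITION & SPEC =====
def Spec_convert_tex_umlauts (content : String) (out : String × Bool) : Prop := out = convert_tex_umlauts_alt content
instance (content : String) (out : String × Bool) : Decidable (Spec_convert_tex_umlauts content out) := by unfold Spec_convert_tex_umlauts; infer_instance

-- ===== CLAIM (what is proved, stated in full; the proofs are below) =====
def Claim_equal_convert_tex_umlauts : Prop := ∀ (content : String), Dom_convert_tex_umlauts content → Spec_convert_tex_umlauts content (convert_tex_umlauts content)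

-- ===== LEMMAS AND PROOFS =====

-- Python str.replace as plain structural recursion (bridged to PySem.Chars.replace below)
def rep (p q : List Char) : List Char → List Char
  | [] => []
  | c :: t => if p.isPrefixOf (c :: t) then q ++ rep p q (t.drop (p.length - 1)) else c :: rep p q t
termination_by l => l.length
decreasing_by all_goals (simp; try omega)

theorem rep_nil (p q : List Char) : rep p q [] = [] := by rw [rep]

theorem rep_neg {p : List Char} {c : Char} {t : List Char} (q : List Char)
    (h : ¬ p.isPrefixOf (c :: t)) : rep p q (c :: t) = c :: rep p q t := by
  rw [rep]; simp [h]

theorem rep_pos {p : List Char} {c : Char} {t : List Char} (q : List Char)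
    (h : p.isPrefixOf (c :: t)) :
    rep p q (c :: t) = q ++ rep p q (t.drop (p.length - 1)) := by
  rw [rep]; simp [h]

theorem go_zero (p q l acc : List Char) : PySem.Chars.replace.go p q 0 l acc = acc.reverse ++ l := by
  rw [PySem.Chars.replace.go]

theorem go_cons (p q acc : List Char) (c : Char) (t : List Char) (n : Nat) :
    PySem.Chars.replace.go p q (n+1) (c::t) acc =
    (if p.isPrefixOf (c::t) then PySem.Chars.replace.go p q n (List.drop p.length (c::t)) (q.reverse ++ acc)
     else PySem.Chars.replace.go p q n t (c::acc)) := by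
  rw [PySem.Chars.replace.go]

theorem go_spec (p q : List Char) (hp : p ≠ []) :
    ∀ fuel l acc, l.length ≤ fuel →
      PySem.Chars.replace.go p q fuel l acc = acc.reverse ++ rep p q l := by
  have hl : 1 ≤ p.length := List.length_pos_of_ne_nil hp
  intro fuel
  induction fuel with
  | zero =>
    intro l acc h
    have : l = [] := by cases l <;> simp_all
    subst this; rw [go_zero, rep]
  | succ n ih =>
    intro l acc h
    match l with
    | [] => rw [PySem.Chars.replace.go, rep] <;> simp
    | c :: t =>
      rw [go_cons]
      have hlen : t.length ≤ n := by simpa using h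
      by_cases hpre : p.isPrefixOf (c :: t)
      · have hple : p.length ≤ t.length + 1 := by
          simpa using List.IsPrefix.length_le (List.isPrefixOf_iff_prefix.mp hpre)
        have hdrop : List.drop p.length (c :: t) = t.drop (p.length - 1) := by
          cases p with
          | nil => simp at hp
          | cons a p' => simp
        rw [if_pos hpre, hdrop, ih _ _ (by simp; omega)]
        rw [rep]
        simp [hpre]
      · rw [if_neg hpre, ih t (c :: acc) hlen, rep]
        simp [hpre]

theorem replace_eq_rep (p q s : List Char) (hp : p ≠ []) :
    PySem.Chars.replace s p q = rep p q s := by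
  rw [PySem.Chars.replace]
  simp only [List.isEmpty_iff, hp, if_false]
  exact go_spec p q hp s.length s [] le_rfl

-- Mism p a: p matches at no start position inside a (not even spanning past a's end)
def Mism (p a : List Char) : Prop :=
  ∀ i < a.length, ∃ j < p.length, i + j < a.length ∧ p[j]? ≠ a[i+j]?

theorem mism_tail {p : List Char} {c : Char} {a : List Char} (h : Mism p (c :: a)) : Mism p a := by
  intro i hi
  obtain ⟨j, hj, hlt, hne⟩ := h (i+1) (by simp; omega)
  exact ⟨j, hj, by simp at hlt ⊢; omega, by simpa [List.getElem?_cons, Nat.add_right_comm] using hne⟩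

theorem not_prefix_of_mism {p a : List Char} (s : List Char) (ha : a ≠ []) (h : Mism p a) :
    ¬ p.isPrefixOf (a ++ s) := by
  intro hpre
  obtain ⟨j, hj, hlt, hne⟩ := h 0 (by cases a <;> simp_all)
  obtain ⟨r, hr⟩ := List.isPrefixOf_iff_prefix.mp hpre
  apply hne
  have hgp : p[j]? = (a ++ s)[j]? := by rw [← hr, List.getElem?_append_left hj]
  simp only [hgp]
  simp at hlt ⊢
  rw [List.getElem?_append_left hlt]

theorem rep_chunk {p : List Char} (q : List Char) (a s : List Char) (h : Mism p a) :
    rep p q (a ++ s) = a ++ rep p q s := by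
  induction a with
  | nil => simp
  | cons c a' ih =>
    have hnp : ¬ p.isPrefixOf (c :: (a' ++ s)) := by
      simpa using not_prefix_of_mism (p := p) (a := c :: a') s (by simp) h
    rw [List.cons_append, rep_neg q hnp, ih (mism_tail h)]
    simp

def stepsFold (L : List (List Char × List Char)) (s : List Char) : List Char :=
  L.foldl (fun s pr => rep pr.1 pr.2 s) s

theorem stepsFold_nil (s : List Char) : stepsFold [] s = s := rfl

theorem stepsFold_cons (pr : List Char × List Char) (L : List (List Char × List Char)) (s : List Char) :
    stepsFold (pr :: L) s = stepsFold L (rep pr.1 pr.2 s) := rfl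

theorem stepsFold_append (L1 L2 : List (List Char × List Char)) (s : List Char) :
    stepsFold (L1 ++ L2) s = stepsFold L2 (stepsFold L1 s) := by
  simp [stepsFold, List.foldl_append]

theorem stepsFold_empty (L : List (List Char × List Char)) : stepsFold L [] = [] := by
  induction L with
  | nil => rfl
  | cons pr L' ih => rw [stepsFold_cons, rep_nil]; exact ih

theorem stepsFold_chunk (L : List (List Char × List Char)) (a s : List Char)
    (h : ∀ pr ∈ L, Mism pr.1 a) :
    stepsFold L (a ++ s) = a ++ stepsFold L s := by
  induction L generalizing s with
  | nil => rfl
  | cons pr L' ih =>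
    rw [stepsFold_cons, rep_chunk pr.2 a s (h pr (by simp)),
        ih (rep pr.1 pr.2 s) (fun x hx => h x (List.mem_cons_of_mem _ hx)), stepsFold_cons]

theorem rep_pull {w p q : List Char} (hq0 : q ≠ []) (hq : ∀ c ∈ w, q.head? ≠ some c)
    {s : List Char} (h : w <+: rep p q s) : w <+: s := by
  induction s generalizing w with
  | nil => rw [rep_nil] at h; simpa using h
  | cons c t ih =>
    by_cases hpre : p.isPrefixOf (c :: t)
    · rw [rep_pos q hpre] at h
      match w, h with
      | [], _ => exact List.nil_prefix
      | w0 :: w', h =>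
        exfalso
        have hh : (q ++ rep p q (t.drop (p.length - 1))).head? = some w0 := by
          obtain ⟨r, hr⟩ := h
          rw [← hr]; rfl
        rw [List.head?_append_of_ne_nil _ hq0] at hh
        exact hq w0 (by simp) hh
    · rw [rep_neg q hpre] at h
      match w, h with
      | [], _ => exact List.nil_prefix
      | w0 :: w', h =>
        obtain ⟨hw0, hw'⟩ := by simpa using (List.cons_prefix_cons.mp h)
        subst hw0
        exact List.cons_prefix_cons.mpr ⟨rfl, ih (fun x hx => hq x (by simp [hx])) hw'⟩

theorem stepsFold_pull {w : List Char} (L : List (List Char × List Char))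
    (h : ∀ pr ∈ L, pr.2 ≠ [] ∧ ∀ c ∈ w, pr.2.head? ≠ some c)
    {s : List Char} (hp : w <+: stepsFold L s) : w <+: s := by
  induction L generalizing s with
  | nil => simpa [stepsFold_nil] using hp
  | cons pr L' ih =>
    rw [stepsFold_cons] at hp
    exact rep_pull (h pr (by simp)).1 (h pr (by simp)).2 (ih (fun x hx => h x (by simp [hx])) hp)

theorem rep_self_not_prefix {p q : List Char} (hp : p ≠ []) (hq0 : q ≠ [])
    (hq : ∀ c ∈ p, q.head? ≠ some c) (s : List Char) : ¬ p <+: rep p q s := by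
  intro h
  match s with
  | [] => rw [rep_nil] at h; exact hp (List.prefix_nil.mp h)
  | c :: t =>
    by_cases hpre : p.isPrefixOf (c :: t)
    · rw [rep_pos q hpre] at h
      match p, hp, h with
      | p0 :: p', _, h =>
        have hh : (q ++ rep (p0::p') q (t.drop ((p0::p').length - 1))).head? = some p0 := by
          obtain ⟨r, hr⟩ := h; rw [← hr]; rfl
        rw [List.head?_append_of_ne_nil _ hq0] at hh
        exact hq p0 (by simp) hh
    · rw [rep_neg q hpre] at h
      match p, hp, h with
      | p0 :: p', _, h =>
        obtain ⟨hw0, hw'⟩ := by simpa using (List.cons_prefix_cons.mp h)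
        subst hw0
        exact hpre (List.isPrefixOf_iff_prefix.mpr
          (List.cons_prefix_cons.mpr ⟨rfl, rep_pull hq0 (fun x hx => hq x (by simp [hx])) hw'⟩))

theorem rep_of_not_infix {p : List Char} (q : List Char) {s : List Char} (h : ¬ p <:+: s) :
    rep p q s = s := by
  induction s with
  | nil => exact rep_nil p q
  | cons c t ih =>
    have hni : ¬ p <:+: t := fun hx => h (List.infix_cons hx)
    have hnp : ¬ p.isPrefixOf (c :: t) := fun hx =>
      h ((List.isPrefixOf_iff_prefix.mp hx).isInfix)
    rw [rep_neg q hnp, ih hni]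

-- A's 18 replacement pairs, on the char-list level (step k of A = entry k here)
def pvSteps : List (List Char × List Char) :=
  [ (['{','\\','"','a','}'], ['ä']), (['{','\\','"','o','}'], ['ö']), (['{','\\','"','u','}'], ['ü']),
    (['{','\\','"','A','}'], ['Ä']), (['{','\\','"','O','}'], ['Ö']), (['{','\\','"','U','}'], ['Ü']),
    (['\\','"','a'], ['ä']), (['\\','"','o'], ['ö']), (['\\','"','u'], ['ü']),
    (['\\','"','A'], ['Ä']), (['\\','"','O'], ['Ö']), (['\\','"','U'], ['Ü']),
    (['{','\\','"','a','}'], ['ä']), (['{','\\','s','s','}'], ['ß']), (['\\','s','s'], ['ß']),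
    (['f','\\','"','u'], ['f','ü','r']), (['f','\\','"','a'], ['f','ä','r']), (['f','\\','"','o'], ['f','ö','r']) ]

theorem peel_headne (L : List (List Char × List Char)) (c : Char)
    (h : ∀ pr ∈ L, pr.1 ≠ [] ∧ pr.1.head? ≠ some c) :
    ∀ t, stepsFold L (c :: t) = c :: stepsFold L t := by
  induction L with
  | nil => intro t; rfl
  | cons pr L' ih =>
    intro t
    have hnp : ¬ pr.1.isPrefixOf (c :: t) := by
      match pr, (h pr (by simp)) with
      | (d :: p', q), hh =>
        have hd : d ≠ c := by simpa using hh.2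
        simp [List.isPrefixOf, hd]
    rw [stepsFold_cons, rep_neg _ hnp, ih (fun x hx => h x (by simp [hx]))]
    rfl

theorem peel_step (K : List (List Char × List Char)) (P : List Char × List Char) (c : Char) (t : List Char)
    (hP : ¬ P.1 <+: c :: stepsFold K t)
    (h : stepsFold K (c :: t) = c :: stepsFold K t) :
    stepsFold (K ++ [P]) (c :: t) = c :: stepsFold (K ++ [P]) t := by
  rw [stepsFold_append, h, stepsFold_append, stepsFold_cons, stepsFold_cons, stepsFold_nil, stepsFold_nil]
  exact rep_neg _ (fun hx => hP (List.isPrefixOf_iff_prefix.mp hx))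

theorem peel_group (K L : List (List Char × List Char)) (c : Char) (t : List Char)
    (hL : ∀ pr ∈ L, pr.1 ≠ [] ∧ pr.1.head? ≠ some c)
    (h : stepsFold K (c :: t) = c :: stepsFold K t) :
    stepsFold (K ++ L) (c :: t) = c :: stepsFold (K ++ L) t := by
  rw [stepsFold_append, h, peel_headne L c hL, stepsFold_append]

theorem rep_fire {p : List Char} (q s : List Char) (hp : p ≠ []) :
    rep p q (p ++ s) = q ++ rep p q s := by
  match p, hp with
  | a :: p', _ =>
    have hpre : (a :: p').isPrefixOf ((a :: p') ++ s) :=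
      List.isPrefixOf_iff_prefix.mpr (List.prefix_append _ _)
    rw [List.cons_append, rep_pos q (by simpa using hpre)]
    simp

theorem fire_general (k : Nat) (a q r : List Char)
    (hsplit : pvSteps = pvSteps.take k ++ (a, q) :: pvSteps.drop (k+1))
    (ha : a ≠ [])
    (h1 : ∀ pr ∈ pvSteps.take k, Mism pr.1 a)
    (h2 : ∀ pr ∈ pvSteps.drop (k+1), Mism pr.1 q) :
    stepsFold pvSteps (a ++ r) = q ++ stepsFold pvSteps r := by
  conv_lhs => rw [hsplit]
  conv_rhs => rw [hsplit]
  rw [stepsFold_append, stepsFold_cons, stepsFold_append, stepsFold_cons]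
  rw [stepsFold_chunk _ a r h1, rep_fire q _ ha, stepsFold_chunk _ q _ h2]

-- Bool versions of the side conditions (kernel-evaluable on the literal tables)
def pullOk (w : List Char) (L : List (List Char × List Char)) : Bool :=
  L.all (fun pr => !pr.2.isEmpty && w.all (fun c => pr.2.head? != some c))

theorem pullOk_spec {w : List Char} {L : List (List Char × List Char)} (h : pullOk w L = true) :
    ∀ pr ∈ L, pr.2 ≠ [] ∧ ∀ c ∈ w, pr.2.head? ≠ some c := by
  intro pr hpr
  have := (List.all_eq_true.mp h) pr hpr
  simp only [Bool.and_eq_true, List.all_eq_true, bne_iff_ne, Bool.not_eq_true'] at this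
  exact ⟨by simpa [List.isEmpty_iff] using this.1, this.2⟩

def headOk (c : Char) (L : List (List Char × List Char)) : Bool :=
  L.all (fun pr => !pr.1.isEmpty && pr.1.head? != some c)

theorem headOk_spec {c : Char} {L : List (List Char × List Char)} (h : headOk c L = true) :
    ∀ pr ∈ L, pr.1 ≠ [] ∧ pr.1.head? ≠ some c := by
  intro pr hpr
  have := (List.all_eq_true.mp h) pr hpr
  simp only [Bool.and_eq_true, bne_iff_ne, Bool.not_eq_true'] at this
  exact ⟨by simpa [List.isEmpty_iff] using this.1, this.2⟩

def mismB (p a : List Char) : Bool :=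
  (List.range a.length).all (fun i =>
    (List.range p.length).any (fun j => decide (i + j < a.length) && (p[j]? != a[i+j]?)))

theorem mismB_spec {p a : List Char} (h : mismB p a = true) : Mism p a := by
  intro i hi
  have := (List.all_eq_true.mp h) i (List.mem_range.mpr hi)
  obtain ⟨j, hj, hb⟩ := List.any_eq_true.mp this
  simp only [Bool.and_eq_true, decide_eq_true_eq, bne_iff_ne] at hb
  exact ⟨j, List.mem_range.mp hj, hb.1, hb.2⟩

def mismOk (L : List (List Char × List Char)) (a : List Char) : Bool :=
  L.all (fun pr => mismB pr.1 a)

theorem mismOk_spec {L : List (List Char × List Char)} {a : List Char} (h : mismOk L a = true) :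
    ∀ pr ∈ L, Mism pr.1 a :=
  fun pr hpr => mismB_spec ((List.all_eq_true.mp h) pr hpr)


-- chain peels a '\' head when none of the backslash patterns starts in t
theorem chainB (t : List Char)
    (ka : ¬ ['"','a'] <+: t) (ko : ¬ ['"','o'] <+: t) (ku : ¬ ['"','u'] <+: t)
    (kA : ¬ ['"','A'] <+: t) (kO : ¬ ['"','O'] <+: t) (kU : ¬ ['"','U'] <+: t)
    (kss : ¬ ['s','s'] <+: t) :
    stepsFold pvSteps ('\\' :: t) = '\\' :: stepsFold pvSteps t := by
  have h6 : stepsFold (pvSteps.take 6) ('\\' :: t) = '\\' :: stepsFold (pvSteps.take 6) t :=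
    peel_headne _ _ (headOk_spec (by decide)) t
  have h7 := peel_step (pvSteps.take 6) (['\\','"','a'], ['ä']) '\\' t
    (fun h => ka (stepsFold_pull _ (pullOk_spec (by decide)) (List.cons_prefix_cons.mp h).2)) h6
  rw [show pvSteps.take 6 ++ [((['\\','"','a'], ['ä']) : List Char × List Char)] = pvSteps.take 7 from rfl] at h7
  have h8 := peel_step (pvSteps.take 7) (['\\','"','o'], ['ö']) '\\' t
    (fun h => ko (stepsFold_pull _ (pullOk_spec (by decide)) (List.cons_prefix_cons.mp h).2)) h7
  rw [show pvSteps.take 7 ++ [((['\\','"','o'], ['ö']) : List Char × List Char)] = pvSteps.take 8 from rfl] at h8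
  have h9 := peel_step (pvSteps.take 8) (['\\','"','u'], ['ü']) '\\' t
    (fun h => ku (stepsFold_pull _ (pullOk_spec (by decide)) (List.cons_prefix_cons.mp h).2)) h8
  rw [show pvSteps.take 8 ++ [((['\\','"','u'], ['ü']) : List Char × List Char)] = pvSteps.take 9 from rfl] at h9
  have h10 := peel_step (pvSteps.take 9) (['\\','"','A'], ['Ä']) '\\' t
    (fun h => kA (stepsFold_pull _ (pullOk_spec (by decide)) (List.cons_prefix_cons.mp h).2)) h9
  rw [show pvSteps.take 9 ++ [((['\\','"','A'], ['Ä']) : List Char × List Char)] = pvSteps.take 10 from rfl] at h10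
  have h11 := peel_step (pvSteps.take 10) (['\\','"','O'], ['Ö']) '\\' t
    (fun h => kO (stepsFold_pull _ (pullOk_spec (by decide)) (List.cons_prefix_cons.mp h).2)) h10
  rw [show pvSteps.take 10 ++ [((['\\','"','O'], ['Ö']) : List Char × List Char)] = pvSteps.take 11 from rfl] at h11
  have h12 := peel_step (pvSteps.take 11) (['\\','"','U'], ['Ü']) '\\' t
    (fun h => kU (stepsFold_pull _ (pullOk_spec (by decide)) (List.cons_prefix_cons.mp h).2)) h11
  rw [show pvSteps.take 11 ++ [((['\\','"','U'], ['Ü']) : List Char × List Char)] = pvSteps.take 12 from rfl] at h12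
  have h14 := peel_group (pvSteps.take 12)
    [(['{','\\','"','a','}'], ['ä']), (['{','\\','s','s','}'], ['ß'])] '\\' t (headOk_spec (by decide)) h12
  rw [show pvSteps.take 12 ++ [((['{','\\','"','a','}'], ['ä']) : List Char × List Char), (['{','\\','s','s','}'], ['ß'])] = pvSteps.take 14 from rfl] at h14
  have h15 := peel_step (pvSteps.take 14) (['\\','s','s'], ['ß']) '\\' t
    (fun h => kss (stepsFold_pull _ (pullOk_spec (by decide)) (List.cons_prefix_cons.mp h).2)) h14
  rw [show pvSteps.take 14 ++ [((['\\','s','s'], ['ß']) : List Char × List Char)] = pvSteps.take 15 from rfl] at h15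
  have h18 := peel_group (pvSteps.take 15)
    [(['f','\\','"','u'], ['f','ü','r']), (['f','\\','"','a'], ['f','ä','r']), (['f','\\','"','o'], ['f','ö','r'])]
    '\\' t (headOk_spec (by decide)) h15
  rw [show pvSteps.take 15 ++ [((['f','\\','"','u'], ['f','ü','r']) : List Char × List Char), (['f','\\','"','a'], ['f','ä','r']), (['f','\\','"','o'], ['f','ö','r'])] = pvSteps from rfl] at h18
  exact h18

-- chain peels a '{' head when no brace pattern completes in t
theorem chainC (t : List Char)
    (ka : ¬ ['\\','"','a','}'] <+: t) (ko : ¬ ['\\','"','o','}'] <+: t) (ku : ¬ ['\\','"','u','}'] <+: t)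
    (kA : ¬ ['\\','"','A','}'] <+: t) (kO : ¬ ['\\','"','O','}'] <+: t) (kU : ¬ ['\\','"','U','}'] <+: t)
    (kss : ¬ ['\\','s','s','}'] <+: t) :
    stepsFold pvSteps ('{' :: t) = '{' :: stepsFold pvSteps t := by
  have h0 : stepsFold (pvSteps.take 0) ('{' :: t) = '{' :: stepsFold (pvSteps.take 0) t := rfl
  have h1 := peel_step (pvSteps.take 0) (['{','\\','"','a','}'], ['ä']) '{' t
    (fun h => ka (stepsFold_pull _ (pullOk_spec (by decide)) (List.cons_prefix_cons.mp h).2)) h0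
  rw [show pvSteps.take 0 ++ [((['{','\\','"','a','}'], ['ä']) : List Char × List Char)] = pvSteps.take 1 from rfl] at h1
  have h2 := peel_step (pvSteps.take 1) (['{','\\','"','o','}'], ['ö']) '{' t
    (fun h => ko (stepsFold_pull _ (pullOk_spec (by decide)) (List.cons_prefix_cons.mp h).2)) h1
  rw [show pvSteps.take 1 ++ [((['{','\\','"','o','}'], ['ö']) : List Char × List Char)] = pvSteps.take 2 from rfl] at h2
  have h3 := peel_step (pvSteps.take 2) (['{','\\','"','u','}'], ['ü']) '{' t
    (fun h => ku (stepsFold_pull _ (pullOk_spec (by decide)) (List.cons_prefix_cons.mp h).2)) h2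
  rw [show pvSteps.take 2 ++ [((['{','\\','"','u','}'], ['ü']) : List Char × List Char)] = pvSteps.take 3 from rfl] at h3
  have h4 := peel_step (pvSteps.take 3) (['{','\\','"','A','}'], ['Ä']) '{' t
    (fun h => kA (stepsFold_pull _ (pullOk_spec (by decide)) (List.cons_prefix_cons.mp h).2)) h3
  rw [show pvSteps.take 3 ++ [((['{','\\','"','A','}'], ['Ä']) : List Char × List Char)] = pvSteps.take 4 from rfl] at h4
  have h5 := peel_step (pvSteps.take 4) (['{','\\','"','O','}'], ['Ö']) '{' t
    (fun h => kO (stepsFold_pull _ (pullOk_spec (by decide)) (List.cons_prefix_cons.mp h).2)) h4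
  rw [show pvSteps.take 4 ++ [((['{','\\','"','O','}'], ['Ö']) : List Char × List Char)] = pvSteps.take 5 from rfl] at h5
  have h6 := peel_step (pvSteps.take 5) (['{','\\','"','U','}'], ['Ü']) '{' t
    (fun h => kU (stepsFold_pull _ (pullOk_spec (by decide)) (List.cons_prefix_cons.mp h).2)) h5
  rw [show pvSteps.take 5 ++ [((['{','\\','"','U','}'], ['Ü']) : List Char × List Char)] = pvSteps.take 6 from rfl] at h6
  have h12 := peel_group (pvSteps.take 6)
    [(['\\','"','a'], ['ä']), (['\\','"','o'], ['ö']), (['\\','"','u'], ['ü']),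
     (['\\','"','A'], ['Ä']), (['\\','"','O'], ['Ö']), (['\\','"','U'], ['Ü'])] '{' t
    (headOk_spec (by decide)) h6
  rw [show pvSteps.take 6 ++ [((['\\','"','a'], ['ä']) : List Char × List Char), (['\\','"','o'], ['ö']), (['\\','"','u'], ['ü']), (['\\','"','A'], ['Ä']), (['\\','"','O'], ['Ö']), (['\\','"','U'], ['Ü'])] = pvSteps.take 12 from rfl] at h12
  have h13 := peel_step (pvSteps.take 12) (['{','\\','"','a','}'], ['ä']) '{' t
    (fun h => ka (stepsFold_pull _ (pullOk_spec (by decide)) (List.cons_prefix_cons.mp h).2)) h12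
  rw [show pvSteps.take 12 ++ [((['{','\\','"','a','}'], ['ä']) : List Char × List Char)] = pvSteps.take 13 from rfl] at h13
  have h14 := peel_step (pvSteps.take 13) (['{','\\','s','s','}'], ['ß']) '{' t
    (fun h => kss (stepsFold_pull _ (pullOk_spec (by decide)) (List.cons_prefix_cons.mp h).2)) h13
  rw [show pvSteps.take 13 ++ [((['{','\\','s','s','}'], ['ß']) : List Char × List Char)] = pvSteps.take 14 from rfl] at h14
  have h18 := peel_group (pvSteps.take 14)
    [(['\\','s','s'], ['ß']), (['f','\\','"','u'], ['f','ü','r']), (['f','\\','"','a'], ['f','ä','r']), (['f','\\','"','o'], ['f','ö','r'])]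
    '{' t (headOk_spec (by decide)) h14
  rw [show pvSteps.take 14 ++ [((['\\','s','s'], ['ß']) : List Char × List Char), (['f','\\','"','u'], ['f','ü','r']), (['f','\\','"','a'], ['f','ä','r']), (['f','\\','"','o'], ['f','ö','r'])] = pvSteps from rfl] at h18
  exact h18

-- chain peels an 'f' head: the f-patterns are dead (their \"x tail was already replaced)
theorem chainF (t : List Char) :
    stepsFold pvSteps ('f' :: t) = 'f' :: stepsFold pvSteps t := by
  have na_u : ¬ ['\\','"','u'] <+: stepsFold (pvSteps.take 15) t := by
    intro h
    rw [show pvSteps.take 15 = pvSteps.take 9 ++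
      [((['\\','"','A'], ['Ä']) : List Char × List Char), (['\\','"','O'], ['Ö']), (['\\','"','U'], ['Ü']),
       (['{','\\','"','a','}'], ['ä']), (['{','\\','s','s','}'], ['ß']), (['\\','s','s'], ['ß'])] from rfl,
      stepsFold_append] at h
    have h9 := stepsFold_pull _ (pullOk_spec (by decide)) h
    rw [show pvSteps.take 9 = pvSteps.take 8 ++ [((['\\','"','u'], ['ü']) : List Char × List Char)] from rfl,
      stepsFold_append, stepsFold_cons, stepsFold_nil] at h9
    exact rep_self_not_prefix (by decide) (by decide) (fun c hc => by fin_cases hc <;> decide) _ h9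
  have h15 : stepsFold (pvSteps.take 15) ('f' :: t) = 'f' :: stepsFold (pvSteps.take 15) t :=
    peel_headne _ _ (headOk_spec (by decide)) t
  have h16 := peel_step (pvSteps.take 15) (['f','\\','"','u'], ['f','ü','r']) 'f' t
    (fun h => na_u (List.cons_prefix_cons.mp h).2) h15
  rw [show pvSteps.take 15 ++ [((['f','\\','"','u'], ['f','ü','r']) : List Char × List Char)] = pvSteps.take 16 from rfl] at h16
  have na_a : ¬ ['\\','"','a'] <+: stepsFold (pvSteps.take 16) t := by
    intro h
    rw [show pvSteps.take 16 = pvSteps.take 7 ++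
      [((['\\','"','o'], ['ö']) : List Char × List Char), (['\\','"','u'], ['ü']),
       (['\\','"','A'], ['Ä']), (['\\','"','O'], ['Ö']), (['\\','"','U'], ['Ü']),
       (['{','\\','"','a','}'], ['ä']), (['{','\\','s','s','}'], ['ß']), (['\\','s','s'], ['ß']),
       (['f','\\','"','u'], ['f','ü','r'])] from rfl,
      stepsFold_append] at h
    have h7 := stepsFold_pull _ (pullOk_spec (by decide)) h
    rw [show pvSteps.take 7 = pvSteps.take 6 ++ [((['\\','"','a'], ['ä']) : List Char × List Char)] from rfl,
      stepsFold_append, stepsFold_cons, stepsFold_nil] at h7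
    exact rep_self_not_prefix (by decide) (by decide) (fun c hc => by fin_cases hc <;> decide) _ h7
  have h17 := peel_step (pvSteps.take 16) (['f','\\','"','a'], ['f','ä','r']) 'f' t
    (fun h => na_a (List.cons_prefix_cons.mp h).2) h16
  rw [show pvSteps.take 16 ++ [((['f','\\','"','a'], ['f','ä','r']) : List Char × List Char)] = pvSteps.take 17 from rfl] at h17
  have na_o : ¬ ['\\','"','o'] <+: stepsFold (pvSteps.take 17) t := by
    intro h
    rw [show pvSteps.take 17 = pvSteps.take 8 ++
      [((['\\','"','u'], ['ü']) : List Char × List Char),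
       (['\\','"','A'], ['Ä']), (['\\','"','O'], ['Ö']), (['\\','"','U'], ['Ü']),
       (['{','\\','"','a','}'], ['ä']), (['{','\\','s','s','}'], ['ß']), (['\\','s','s'], ['ß']),
       (['f','\\','"','u'], ['f','ü','r']), (['f','\\','"','a'], ['f','ä','r'])] from rfl,
      stepsFold_append] at h
    have h8 := stepsFold_pull _ (pullOk_spec (by decide)) h
    rw [show pvSteps.take 8 = pvSteps.take 7 ++ [((['\\','"','o'], ['ö']) : List Char × List Char)] from rfl,
      stepsFold_append, stepsFold_cons, stepsFold_nil] at h8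
    exact rep_self_not_prefix (by decide) (by decide) (fun c hc => by fin_cases hc <;> decide) _ h8
  have h18 := peel_step (pvSteps.take 17) (['f','\\','"','o'], ['f','ö','r']) 'f' t
    (fun h => na_o (List.cons_prefix_cons.mp h).2) h17
  rw [show pvSteps.take 17 ++ [((['f','\\','"','o'], ['f','ö','r']) : List Char × List Char)] = pvSteps from rfl] at h18
  exact h18

-- chain peels any other head
theorem chainG (c : Char) (t : List Char) (h1 : c ≠ '{') (h2 : c ≠ '\\') (h3 : c ≠ 'f') :
    stepsFold pvSteps (c :: t) = c :: stepsFold pvSteps t := by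
  refine peel_headne pvSteps c ?_ t
  intro pr hpr
  fin_cases hpr <;>
    exact ⟨by decide, by
      intro hh
      simp only [List.head?_cons, Option.some.injEq] at hh
      first | exact h1 hh.symm | exact h2 hh.symm | exact h3 hh.symm⟩

-- scanner evaluation lemmas
theorem scan_other (c : Char) (t : List Char) (h1 : c ≠ '{') (h2 : c ≠ '\\') :
    pvScan (c :: t) = c :: pvScan t := by
  have e1 : ('{' == c) = false := by simp [Ne.symm h1]
  have e2 : ('\\' == c) = false := by simp [Ne.symm h2]
  rw [pvScan]; simp [pvTable, List.find?, List.isPrefixOf, e1, e2]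

set_option maxHeartbeats 1000000

theorem chain_eq_scan : ∀ (l : List Char), stepsFold pvSteps l = pvScan l := by
  have main : ∀ (n : Nat) (l : List Char), l.length ≤ n → stepsFold pvSteps l = pvScan l := by
    intro n
    induction n with
    | zero =>
      intro l h
      have : l = [] := by cases l <;> simp_all
      subst this
      rw [stepsFold_empty, pvScan]
    | succ n ih =>
      intro l hlen
      match l with
      | [] => rw [stepsFold_empty, pvScan]
      | c :: t =>
        have ht : t.length ≤ n := by simpa using hlen
        by_cases h1 : c = '{'
        · subst h1
          cases hfind : pvTable.find? (fun pr => pr.1.isPrefixOf ('{' :: t)) with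
          | none =>
            have hall := List.find?_eq_none.mp hfind
            have ka : ¬ ['\\','"','a','}'] <+: t := fun hx => by
              have := hall (['{','\\','"','a','}'], ['ä']) (by simp [pvTable])
              exact this (List.isPrefixOf_iff_prefix.mpr (List.cons_prefix_cons.mpr ⟨rfl, hx⟩))
            have ko : ¬ ['\\','"','o','}'] <+: t := fun hx => by
              have := hall (['{','\\','"','o','}'], ['ö']) (by simp [pvTable])
              exact this (List.isPrefixOf_iff_prefix.mpr (List.cons_prefix_cons.mpr ⟨rfl, hx⟩))
            have ku : ¬ ['\\','"','u','}'] <+: t := fun hx => by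
              have := hall (['{','\\','"','u','}'], ['ü']) (by simp [pvTable])
              exact this (List.isPrefixOf_iff_prefix.mpr (List.cons_prefix_cons.mpr ⟨rfl, hx⟩))
            have kA : ¬ ['\\','"','A','}'] <+: t := fun hx => by
              have := hall (['{','\\','"','A','}'], ['Ä']) (by simp [pvTable])
              exact this (List.isPrefixOf_iff_prefix.mpr (List.cons_prefix_cons.mpr ⟨rfl, hx⟩))
            have kO : ¬ ['\\','"','O','}'] <+: t := fun hx => by
              have := hall (['{','\\','"','O','}'], ['Ö']) (by simp [pvTable])
              exact this (List.isPrefixOf_iff_prefix.mpr (List.cons_prefix_cons.mpr ⟨rfl, hx⟩))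
            have kU : ¬ ['\\','"','U','}'] <+: t := fun hx => by
              have := hall (['{','\\','"','U','}'], ['Ü']) (by simp [pvTable])
              exact this (List.isPrefixOf_iff_prefix.mpr (List.cons_prefix_cons.mpr ⟨rfl, hx⟩))
            have kss : ¬ ['\\','s','s','}'] <+: t := fun hx => by
              have := hall (['{','\\','s','s','}'], ['ß']) (by simp [pvTable])
              exact this (List.isPrefixOf_iff_prefix.mpr (List.cons_prefix_cons.mpr ⟨rfl, hx⟩))
            rw [chainC t ka ko ku kA kO kU kss, ih t ht, pvScan, hfind]
          | some pr =>
            have hmem := List.mem_of_find?_eq_some hfind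
            have hpred : pr.1.isPrefixOf ('{' :: t) = true := by simpa using List.find?_some hfind
            fin_cases hmem
            · obtain ⟨r, hr⟩ := List.isPrefixOf_iff_prefix.mp hpred
              simp only [List.cons_append, List.nil_append, List.cons.injEq, true_and] at hr
              obtain ⟨rfl⟩ := hr.symm
              have hc := fire_general 0 ['{','\\','"','a','}'] ['ä'] r rfl (by decide)
                (mismOk_spec (by decide)) (mismOk_spec (by decide))
              simp only [List.cons_append, List.nil_append] at hc
              rw [hc, ih r (by simp at hlen; omega), pvScan, hfind]
              simp
            · obtain ⟨r, hr⟩ := List.isPrefixOf_iff_prefix.mp hpred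
              simp only [List.cons_append, List.nil_append, List.cons.injEq, true_and] at hr
              obtain ⟨rfl⟩ := hr.symm
              have hc := fire_general 1 ['{','\\','"','o','}'] ['ö'] r rfl (by decide)
                (mismOk_spec (by decide)) (mismOk_spec (by decide))
              simp only [List.cons_append, List.nil_append] at hc
              rw [hc, ih r (by simp at hlen; omega), pvScan, hfind]
              simp
            · obtain ⟨r, hr⟩ := List.isPrefixOf_iff_prefix.mp hpred
              simp only [List.cons_append, List.nil_append, List.cons.injEq, true_and] at hr
              obtain ⟨rfl⟩ := hr.symm
              have hc := fire_general 2 ['{','\\','"','u','}'] ['ü'] r rfl (by decide)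
                (mismOk_spec (by decide)) (mismOk_spec (by decide))
              simp only [List.cons_append, List.nil_append] at hc
              rw [hc, ih r (by simp at hlen; omega), pvScan, hfind]
              simp
            · obtain ⟨r, hr⟩ := List.isPrefixOf_iff_prefix.mp hpred
              simp only [List.cons_append, List.nil_append, List.cons.injEq, true_and] at hr
              obtain ⟨rfl⟩ := hr.symm
              have hc := fire_general 3 ['{','\\','"','A','}'] ['Ä'] r rfl (by decide)
                (mismOk_spec (by decide)) (mismOk_spec (by decide))
              simp only [List.cons_append, List.nil_append] at hc
              rw [hc, ih r (by simp at hlen; omega), pvScan, hfind]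
              simp
            · obtain ⟨r, hr⟩ := List.isPrefixOf_iff_prefix.mp hpred
              simp only [List.cons_append, List.nil_append, List.cons.injEq, true_and] at hr
              obtain ⟨rfl⟩ := hr.symm
              have hc := fire_general 4 ['{','\\','"','O','}'] ['Ö'] r rfl (by decide)
                (mismOk_spec (by decide)) (mismOk_spec (by decide))
              simp only [List.cons_append, List.nil_append] at hc
              rw [hc, ih r (by simp at hlen; omega), pvScan, hfind]
              simp
            · obtain ⟨r, hr⟩ := List.isPrefixOf_iff_prefix.mp hpred
              simp only [List.cons_append, List.nil_append, List.cons.injEq, true_and] at hr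
              obtain ⟨rfl⟩ := hr.symm
              have hc := fire_general 5 ['{','\\','"','U','}'] ['Ü'] r rfl (by decide)
                (mismOk_spec (by decide)) (mismOk_spec (by decide))
              simp only [List.cons_append, List.nil_append] at hc
              rw [hc, ih r (by simp at hlen; omega), pvScan, hfind]
              simp
            · obtain ⟨r, hr⟩ := List.isPrefixOf_iff_prefix.mp hpred
              simp only [List.cons_append, List.nil_append, List.cons.injEq, true_and] at hr
              obtain ⟨rfl⟩ := hr.symm
              have hc := fire_general 13 ['{','\\','s','s','}'] ['ß'] r rfl (by decide)
                (mismOk_spec (by decide)) (mismOk_spec (by decide))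
              simp only [List.cons_append, List.nil_append] at hc
              rw [hc, ih r (by simp at hlen; omega), pvScan, hfind]
              simp
            all_goals simp [List.isPrefixOf] at hpred
        · by_cases h2 : c = '\\'
          · subst h2
            cases hfind : pvTable.find? (fun pr => pr.1.isPrefixOf ('\\' :: t)) with
            | none =>
              have hall := List.find?_eq_none.mp hfind
              have ka : ¬ ['"','a'] <+: t := fun hx => by
                have := hall (['\\','"','a'], ['ä']) (by simp [pvTable])
                exact this (List.isPrefixOf_iff_prefix.mpr (List.cons_prefix_cons.mpr ⟨rfl, hx⟩))
              have ko : ¬ ['"','o'] <+: t := fun hx => by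
                have := hall (['\\','"','o'], ['ö']) (by simp [pvTable])
                exact this (List.isPrefixOf_iff_prefix.mpr (List.cons_prefix_cons.mpr ⟨rfl, hx⟩))
              have ku : ¬ ['"','u'] <+: t := fun hx => by
                have := hall (['\\','"','u'], ['ü']) (by simp [pvTable])
                exact this (List.isPrefixOf_iff_prefix.mpr (List.cons_prefix_cons.mpr ⟨rfl, hx⟩))
              have kA : ¬ ['"','A'] <+: t := fun hx => by
                have := hall (['\\','"','A'], ['Ä']) (by simp [pvTable])
                exact this (List.isPrefixOf_iff_prefix.mpr (List.cons_prefix_cons.mpr ⟨rfl, hx⟩))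
              have kO : ¬ ['"','O'] <+: t := fun hx => by
                have := hall (['\\','"','O'], ['Ö']) (by simp [pvTable])
                exact this (List.isPrefixOf_iff_prefix.mpr (List.cons_prefix_cons.mpr ⟨rfl, hx⟩))
              have kU : ¬ ['"','U'] <+: t := fun hx => by
                have := hall (['\\','"','U'], ['Ü']) (by simp [pvTable])
                exact this (List.isPrefixOf_iff_prefix.mpr (List.cons_prefix_cons.mpr ⟨rfl, hx⟩))
              have kss : ¬ ['s','s'] <+: t := fun hx => by
                have := hall (['\\','s','s'], ['ß']) (by simp [pvTable])
                exact this (List.isPrefixOf_iff_prefix.mpr (List.cons_prefix_cons.mpr ⟨rfl, hx⟩))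
              rw [chainB t ka ko ku kA kO kU kss, ih t ht, pvScan, hfind]
            | some pr =>
              have hmem := List.mem_of_find?_eq_some hfind
              have hpred : pr.1.isPrefixOf ('\\' :: t) = true := by simpa using List.find?_some hfind
              fin_cases hmem
              · simp [List.isPrefixOf] at hpred
              · simp [List.isPrefixOf] at hpred
              · simp [List.isPrefixOf] at hpred
              · simp [List.isPrefixOf] at hpred
              · simp [List.isPrefixOf] at hpred
              · simp [List.isPrefixOf] at hpred
              · simp [List.isPrefixOf] at hpred
              · obtain ⟨r, hr⟩ := List.isPrefixOf_iff_prefix.mp hpred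
                simp only [List.cons_append, List.nil_append, List.cons.injEq, true_and] at hr
                obtain ⟨rfl⟩ := hr.symm
                have hc := fire_general 6 ['\\','"','a'] ['ä'] r rfl (by decide)
                  (mismOk_spec (by decide)) (mismOk_spec (by decide))
                simp only [List.cons_append, List.nil_append] at hc
                rw [hc, ih r (by simp at hlen; omega), pvScan, hfind]
                simp
              · obtain ⟨r, hr⟩ := List.isPrefixOf_iff_prefix.mp hpred
                simp only [List.cons_append, List.nil_append, List.cons.injEq, true_and] at hr
                obtain ⟨rfl⟩ := hr.symm
                have hc := fire_general 7 ['\\','"','o'] ['ö'] r rfl (by decide)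
                  (mismOk_spec (by decide)) (mismOk_spec (by decide))
                simp only [List.cons_append, List.nil_append] at hc
                rw [hc, ih r (by simp at hlen; omega), pvScan, hfind]
                simp
              · obtain ⟨r, hr⟩ := List.isPrefixOf_iff_prefix.mp hpred
                simp only [List.cons_append, List.nil_append, List.cons.injEq, true_and] at hr
                obtain ⟨rfl⟩ := hr.symm
                have hc := fire_general 8 ['\\','"','u'] ['ü'] r rfl (by decide)
                  (mismOk_spec (by decide)) (mismOk_spec (by decide))
                simp only [List.cons_append, List.nil_append] at hc
                rw [hc, ih r (by simp at hlen; omega), pvScan, hfind]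
                simp
              · obtain ⟨r, hr⟩ := List.isPrefixOf_iff_prefix.mp hpred
                simp only [List.cons_append, List.nil_append, List.cons.injEq, true_and] at hr
                obtain ⟨rfl⟩ := hr.symm
                have hc := fire_general 9 ['\\','"','A'] ['Ä'] r rfl (by decide)
                  (mismOk_spec (by decide)) (mismOk_spec (by decide))
                simp only [List.cons_append, List.nil_append] at hc
                rw [hc, ih r (by simp at hlen; omega), pvScan, hfind]
                simp
              · obtain ⟨r, hr⟩ := List.isPrefixOf_iff_prefix.mp hpred
                simp only [List.cons_append, List.nil_append, List.cons.injEq, true_and] at hr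
                obtain ⟨rfl⟩ := hr.symm
                have hc := fire_general 10 ['\\','"','O'] ['Ö'] r rfl (by decide)
                  (mismOk_spec (by decide)) (mismOk_spec (by decide))
                simp only [List.cons_append, List.nil_append] at hc
                rw [hc, ih r (by simp at hlen; omega), pvScan, hfind]
                simp
              · obtain ⟨r, hr⟩ := List.isPrefixOf_iff_prefix.mp hpred
                simp only [List.cons_append, List.nil_append, List.cons.injEq, true_and] at hr
                obtain ⟨rfl⟩ := hr.symm
                have hc := fire_general 11 ['\\','"','U'] ['Ü'] r rfl (by decide)
                  (mismOk_spec (by decide)) (mismOk_spec (by decide))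
                simp only [List.cons_append, List.nil_append] at hc
                rw [hc, ih r (by simp at hlen; omega), pvScan, hfind]
                simp
              · obtain ⟨r, hr⟩ := List.isPrefixOf_iff_prefix.mp hpred
                simp only [List.cons_append, List.nil_append, List.cons.injEq, true_and] at hr
                obtain ⟨rfl⟩ := hr.symm
                have hc := fire_general 14 ['\\','s','s'] ['ß'] r rfl (by decide)
                  (mismOk_spec (by decide)) (mismOk_spec (by decide))
                simp only [List.cons_append, List.nil_append] at hc
                rw [hc, ih r (by simp at hlen; omega), pvScan, hfind]
                simp
          · by_cases h3 : c = 'f'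
            · subst h3
              rw [chainF t, scan_other 'f' t (by decide) (by decide), ih t ht]
            · rw [chainG c t h1 h2 h3, scan_other c t h1 h2, ih t ht]
  intro l
  exact main l.length l le_rfl

-- ===== A-side: the conditional replace chain and its modified flag =====
def hasBad (s : List Char) : Prop := ∃ c ∈ s, 126 < c.toNat

theorem rep_bad_pres {p : List Char} (q : List Char) (hp0 : p ≠ [])
    (hp : ∀ c ∈ p, c.toNat ≤ 126) :
    ∀ (n : Nat) (s : List Char), s.length ≤ n → hasBad s → hasBad (rep p q s) := by
  intro n
  induction n with
  | zero =>
    intro s hl h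
    have : s = [] := by cases s <;> simp_all
    subst this; simp [hasBad] at h
  | succ n ih =>
    intro s hl h
    match s with
    | [] => simp [hasBad] at h
    | c :: t =>
      by_cases hpre : p.isPrefixOf (c :: t)
      · rw [rep_pos q hpre]
        obtain ⟨r0, hr⟩ := List.isPrefixOf_iff_prefix.mp hpre
        have hr0 : r0 = t.drop (p.length - 1) := by
          have : r0 = (c :: t).drop p.length := by rw [← hr]; simp
          rw [this]
          cases p with
          | nil => simp at hp0
          | cons a p' => simp
        obtain ⟨b, hb, hbad⟩ := h
        rw [← hr] at hb
        rcases List.mem_append.mp hb with hbp | hbr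
        · exact absurd hbad (by simpa using hp b hbp)
        · have hlen : r0.length ≤ n := by
            have := congrArg List.length hr
            have hp1 : 1 ≤ p.length := List.length_pos_of_ne_nil hp0
            simp at this hl ⊢
            omega
          obtain ⟨b', hb', hbad'⟩ := ih r0 hlen ⟨b, hbr, hbad⟩
          exact ⟨b', by rw [← hr0]; simp [hb'], hbad'⟩
      · rw [rep_neg q hpre]
        obtain ⟨b, hb, hbad⟩ := h
        rcases List.mem_cons.mp hb with rfl | hbt
        · exact ⟨b, by simp, hbad⟩
        · obtain ⟨b', hb', hbad'⟩ := ih t (by simpa using hl) ⟨b, hbt, hbad⟩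
          exact ⟨b', by simp [hb'], hbad'⟩

theorem rep_bad_new {p : List Char} (q : List Char) (hp0 : p ≠ []) (hq : hasBad q)
    {s : List Char} (h : p <:+: s) : hasBad (rep p q s) := by
  induction s with
  | nil =>
    exact absurd (List.eq_nil_of_infix_nil h) hp0
  | cons c t ih =>
    by_cases hpre : p.isPrefixOf (c :: t)
    · rw [rep_pos q hpre]
      obtain ⟨b, hb, hbad⟩ := hq
      exact ⟨b, by simp [hb], hbad⟩
    · rw [rep_neg q hpre]
      have hti : p <:+: t := by
        rcases List.infix_cons_iff.mp h with hx | hx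
        · exact absurd (List.isPrefixOf_iff_prefix.mpr hx) hpre
        · exact hx
      obtain ⟨b, hb, hbad⟩ := ih hti
      exact ⟨b, by simp [hb], hbad⟩

def condFold (L : List (List Char × List Char)) (st : List Char × Bool) : List Char × Bool :=
  L.foldl (fun st pr =>
    if PySem.Chars.isIn pr.1 st.1 then (PySem.Chars.replace st.1 pr.1 pr.2, true) else st) st

theorem condFold_cons (pr : List Char × List Char) (L : List (List Char × List Char)) (st : List Char × Bool) :
    condFold (pr :: L) st =
      condFold L (if PySem.Chars.isIn pr.1 st.1 then (PySem.Chars.replace st.1 pr.1 pr.2, true) else st) := rfl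

theorem condFold_fst (L : List (List Char × List Char)) (h : ∀ pr ∈ L, pr.1 ≠ []) :
    ∀ st : List Char × Bool, (condFold L st).1 = stepsFold L st.1 := by
  induction L with
  | nil => intro st; rfl
  | cons pr L' ih =>
    intro st
    rw [condFold_cons, stepsFold_cons, ih (fun x hx => h x (by simp [hx]))]
    congr 1
    by_cases hin : PySem.Chars.isIn pr.1 st.1 = true
    · simp [hin, replace_eq_rep _ _ _ (h pr (by simp))]
    · simp only [Bool.not_eq_true] at hin
      simp [hin]
      exact (rep_of_not_infix _ ((PySem.Chars.isIn_eq_false_iff _ _).mp hin)).symm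

theorem condFold_mono (L : List (List Char × List Char)) :
    ∀ s : List Char, (condFold L (s, true)).2 = true := by
  induction L with
  | nil => intro s; rfl
  | cons pr L' ih =>
    intro s
    rw [condFold_cons]
    by_cases hin : PySem.Chars.isIn pr.1 s = true
    · simp only [hin, if_pos]; exact ih _
    · simp only [Bool.not_eq_true] at hin
      simp only [hin, Bool.false_eq_true, if_neg, if_false]
      exact ih s

theorem condFold_false (L : List (List Char × List Char)) :
    ∀ s : List Char, (condFold L (s, false)).2 = false → (condFold L (s, false)).1 = s := by
  induction L with
  | nil => intro s _; rfl
  | cons pr L' ih =>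
    intro s hflag
    rw [condFold_cons] at hflag ⊢
    by_cases hin : PySem.Chars.isIn pr.1 s = true
    · rw [if_pos hin] at hflag
      rw [condFold_mono L' _] at hflag
      exact absurd hflag (by simp)
    · simp only [Bool.not_eq_true] at hin
      simp only [hin, Bool.false_eq_true, if_neg, if_false] at hflag ⊢
      exact ih s hflag

theorem condFold_bad_pres (L : List (List Char × List Char))
    (h : ∀ pr ∈ L, pr.1 ≠ [] ∧ ∀ c ∈ pr.1, c.toNat ≤ 126) :
    ∀ st : List Char × Bool, hasBad st.1 → hasBad (condFold L st).1 := by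
  induction L with
  | nil => intro st hb; exact hb
  | cons pr L' ih =>
    intro st hb
    rw [condFold_cons]
    apply ih (fun x hx => h x (by simp [hx]))
    by_cases hin : PySem.Chars.isIn pr.1 st.1 = true
    · simp only [hin, if_pos]
      rw [replace_eq_rep _ _ _ (h pr (by simp)).1]
      exact rep_bad_pres pr.2 (h pr (by simp)).1 (h pr (by simp)).2 st.1.length st.1 le_rfl hb
    · simp only [Bool.not_eq_true] at hin
      simpa [hin] using hb

theorem condFold_bad (L : List (List Char × List Char))
    (h : ∀ pr ∈ L, (pr.1 ≠ [] ∧ ∀ c ∈ pr.1, c.toNat ≤ 126) ∧ hasBad pr.2) :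
    ∀ s : List Char, (condFold L (s, false)).2 = true → hasBad (condFold L (s, false)).1 := by
  induction L with
  | nil => intro s hflag; simp [condFold] at hflag
  | cons pr L' ih =>
    intro s hflag
    rw [condFold_cons] at *
    by_cases hin : PySem.Chars.isIn pr.1 s = true
    · rw [if_pos hin] at *
      apply condFold_bad_pres L' (fun x hx => ((h x (by simp [hx])).1))
      simp only
      rw [replace_eq_rep _ _ _ ((h pr (by simp)).1).1]
      exact rep_bad_new pr.2 ((h pr (by simp)).1).1 (h pr (by simp)).2
        ((PySem.Chars.isIn_iff_infix _ _).mp hin)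
    · simp only [Bool.not_eq_true] at hin
      simp only [hin, Bool.false_eq_true, if_neg, if_false] at *
      exact ih (fun x hx => h x (by simp [hx])) s hflag

-- Bool checker for the pvSteps side conditions
def stepsOk (L : List (List Char × List Char)) : Bool :=
  L.all (fun pr => !pr.1.isEmpty && pr.1.all (fun c => decide (c.toNat ≤ 126))
                   && pr.2.any (fun c => decide (126 < c.toNat)))

theorem stepsOk_spec {L : List (List Char × List Char)} (h : stepsOk L = true) :
    ∀ pr ∈ L, (pr.1 ≠ [] ∧ ∀ c ∈ pr.1, c.toNat ≤ 126) ∧ hasBad pr.2 := by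
  intro pr hpr
  have := (List.all_eq_true.mp h) pr hpr
  simp only [Bool.and_eq_true, List.all_eq_true, List.any_eq_true, decide_eq_true_eq,
    Bool.not_eq_true'] at this
  exact ⟨⟨by simpa [List.isEmpty_iff] using this.1.1, this.1.2⟩, this.2⟩

-- the String-level foldl of port A, reduced to condFold on char lists
theorem strFold_eq (R : List (String × String)) :
    ∀ (s : String) (m : Bool),
      R.foldl (fun st pr =>
        if PySem.Str.isIn pr.1 st.1 then (PySem.Str.replace st.1 pr.1 pr.2, true) else st) (s, m)
      = (String.ofList (condFold (R.map (fun pr => (pr.1.toList, pr.2.toList))) (s.toList, m)).1,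
         (condFold (R.map (fun pr => (pr.1.toList, pr.2.toList))) (s.toList, m)).2) := by
  induction R with
  | nil => intro s m; simp [condFold]
  | cons pr R' ih =>
    intro s m
    simp only [List.foldl_cons, List.map_cons, condFold_cons]
    by_cases hin : PySem.Str.isIn pr.1 s = true
    · have hin' : PySem.Chars.isIn pr.1.toList s.toList = true := by
        rw [← PySem.Str.isIn_eq]; exact hin
      rw [if_pos hin, if_pos hin']
      have := ih (PySem.Str.replace s pr.1 pr.2) true
      rw [this]
      simp [PySem.Str.toList_replace, condFold]
    · have hin' : ¬ PySem.Chars.isIn pr.1.toList s.toList = true := by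
        rw [← PySem.Str.isIn_eq]; exact hin
      rw [if_neg hin, if_neg hin']
      exact ih s m

theorem pvSteps_eq_map : pvReplacements.map (fun pr => (pr.1.toList, pr.2.toList)) = pvSteps := by
  decide

theorem dom_le_126 {content : String} (hdom : Dom_convert_tex_umlauts content) :
    ∀ c ∈ content.toList, c.toNat ≤ 126 := by
  intro c hc
  have := (List.all_eq_true.mp hdom) c hc
  simp only [pvDomChar, Bool.or_eq_true, Bool.and_eq_true, decide_eq_true_eq, beq_iff_eq] at this
  omega

-- ===== VERDICT (by name: the statement is the Claim_ definition above) =====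
theorem convert_tex_umlauts_spec : Claim_equal_convert_tex_umlauts := by
  intro content hdom
  unfold Spec_convert_tex_umlauts convert_tex_umlauts convert_tex_umlauts_alt
  rw [strFold_eq pvReplacements content false, pvSteps_eq_map]
  have hok : ∀ pr ∈ pvSteps, (pr.1 ≠ [] ∧ ∀ c ∈ pr.1, c.toNat ≤ 126) ∧ hasBad pr.2 :=
    stepsOk_spec (by decide)
  have hfst : (condFold pvSteps (content.toList, false)).1 = stepsFold pvSteps content.toList :=
    condFold_fst pvSteps (fun pr hpr => (hok pr hpr).1.1) (content.toList, false)
  have hscan := chain_eq_scan content.toList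
  cases hflag : (condFold pvSteps (content.toList, false)).2 with
  | false =>
    have hid : (condFold pvSteps (content.toList, false)).1 = content.toList :=
      condFold_false pvSteps content.toList hflag
    have hl : pvScan content.toList = content.toList := by rw [← hscan, ← hfst, hid]
    refine Prod.ext ?_ ?_
    · simp only [hid, hl]
    · simp only [hflag, hl]
      have : String.ofList content.toList = content := by simp
      rw [this]
      simp
  | true =>
    have hbad : hasBad (condFold pvSteps (content.toList, false)).1 :=
      condFold_bad pvSteps hok content.toList hflag
    have hbad' : hasBad (pvScan content.toList) := by rw [← hscan, ← hfst]; exact hbad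
    have hne : pvScan content.toList ≠ content.toList := by
      intro he
      obtain ⟨b, hb, hbadb⟩ := hbad'
      rw [he] at hb
      have := dom_le_126 hdom b hb
      omega
    refine Prod.ext ?_ ?_
    · simp only [hfst, hscan]
    · simp only [hflag]
      have : String.ofList (pvScan content.toList) ≠ content := by
        intro he
        apply hne
        have := congrArg String.toList he
        simpa using this
      simp [bne_iff_ne, this]
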